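-- pv_equiv track=rewrite | github.com/masahiro-999/atcoder-workspace | agc039/A/main.py | solve
-- ===== SOURCE A (Python) =====
-- def solve(S: str, K: int):
--
--     def first_diff(S):
--         l = len(S)
--         for i in range(l):
--             if S[i] != S[(i+1)%l]:
--                 return (i+1)%l
--         return -1
--
--     fd = first_diff(S)
--     if fd == -1:
--         return len(S)*K //2
--
--     S1 = S[fd:]+S[:fd]
--     c = 1
--     c_sum = 0
--     c_last = 0
--     l = len(S)
--     for i in range(l):
--         if S1[i] != S1[(i+1)%l]:
--             c_sum += c // 2
--             c_last = c // 2
--             c = 1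
--         else:
--             c += 1
--     if c > 2:
--         c_sum += c // 2
--         c_last = c // 2
--     ans = c_sum*K
--     if S[0] == S[-1]:
--         ans -= c_last
--         c1 = first_diff(S)
--         c2 = first_diff(S[::-1])
--         ans += c1 // 2 + c2 // 2
--     return(ans)
-- ===== SOURCE B (Python) =====
-- def solve(S: str, K: int):
--     # f(T): minimal removals to make T free of equal adjacent characters,
--     # computed in one linear pass over adjacent pairs.
--     def f(T):
--         total, run = 0, 1
--         for a, b in zip(T, T[1:]):
--             if b == a:
--                 run += 1
--             else:
--                 total += run // 2
--                 run = 1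
--         return total + run // 2
--
--     if all(ch == S[0] for ch in S):
--         return len(S) * K // 2
--     # For a non-constant S, the answer on S repeated K times is linear in K:
--     # f(S) + (K - 1) * (f(S + S) - f(S))   (standard doubling identity)
--     return f(S) + (K - 1) * (f(S + S) - f(S))
-- ===== Notes on version B (the rewrite author's own statement) =====
-- stated objective: simpler
-- what changed: B drops A's rotation-to-a-run-boundary, cyclic run counting and the S[0]==S[-1] correction block entirely: it computes a plain linear-pass cost f(T)=sum(run//2) over adjacent pairs of S and of S+S and returns f(S)+(K-1)*(f(S+S)-f(S)), the doubling identity for the answer on S repeated K times.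
import Mathlib
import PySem

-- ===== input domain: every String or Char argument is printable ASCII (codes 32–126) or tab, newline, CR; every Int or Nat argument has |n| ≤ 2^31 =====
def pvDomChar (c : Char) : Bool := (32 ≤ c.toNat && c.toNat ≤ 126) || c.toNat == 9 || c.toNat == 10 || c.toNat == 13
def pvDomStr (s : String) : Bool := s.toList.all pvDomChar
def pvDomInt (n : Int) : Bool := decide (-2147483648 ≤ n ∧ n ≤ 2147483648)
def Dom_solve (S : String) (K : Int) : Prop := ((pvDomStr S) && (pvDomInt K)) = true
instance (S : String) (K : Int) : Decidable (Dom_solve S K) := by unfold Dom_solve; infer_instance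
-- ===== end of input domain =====

-- B drops A's rotation, cyclic-run counting and boundary-correction block: it computes the
-- linear pass cost f on S and on S+S and returns f(S) + (K-1)*(f(S+S) - f(S)) (simpler).

-- ===== PORT A =====
-- literal transliteration of the Python helper `first_diff`
-- (the for-with-return loop becomes the obvious structural recursion on the index)
def firstDiffGo (s : List Char) (i : Nat) : Int :=
  if _h : i < s.length then
    if s.getD i ' ' ≠ s.getD ((i + 1) % s.length) ' ' then (((i + 1) % s.length : Nat) : Int)
    else firstDiffGo s (i + 1)
  else -1
termination_by s.length - i

def firstDiff (s : List Char) : Int := firstDiffGo s 0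

def solve (S : String) (K : Int) : Int :=
  let s := S.toList
  let fd := firstDiff s
  if fd = -1 then PySem.Int.floordiv ((s.length : Int) * K) 2
  else
    let s1 := PySem.List.slice s (some fd) none ++ PySem.List.slice s none (some fd)
    let st := (List.range s.length).foldl (fun (st : Int × Int × Int) (i : Nat) =>
        if s1.getD i ' ' ≠ s1.getD ((i + 1) % s.length) ' ' then
          (1, st.2.1 + PySem.Int.floordiv st.1 2, PySem.Int.floordiv st.1 2)
        else (st.1 + 1, st.2.1, st.2.2)) (1, 0, 0)
    let st2 := if st.1 > 2 then
        (st.1, st.2.1 + PySem.Int.floordiv st.1 2, PySem.Int.floordiv st.1 2)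
      else st
    let ans := st2.2.1 * K
    if s.getD 0 ' ' = PySem.List.pyGetD s (-1) ' ' then
      ans - st2.2.2 + PySem.Int.floordiv (firstDiff s) 2
        + PySem.Int.floordiv (firstDiff s.reverse) 2
    else ans

-- ===== PORT B =====
-- the helper f of Source B: one pass over adjacent pairs zip(T, T[1:]) carrying (total, run)
def fpass (t : List Char) : Int :=
  let st := (t.zip (t.drop 1)).foldl (fun (st : Int × Int) (pr : Char × Char) =>
      if pr.2 = pr.1 then (st.1, st.2 + 1)
      else (st.1 + PySem.Int.floordiv st.2 2, 1)) (0, 1)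
  st.1 + PySem.Int.floordiv st.2 2

def solve_alt (S : String) (K : Int) : Int :=
  let s := S.toList
  if s.all (fun ch => ch == s.getD 0 ' ') then PySem.Int.floordiv ((s.length : Int) * K) 2
  else fpass s + (K - 1) * (fpass (s ++ s) - fpass s)

-- ===== PRECONDITION & SPEC =====
def Spec_solve (S : String) (K : Int) (out : Int) : Prop := out = solve_alt S K
instance (S : String) (K : Int) (out : Int) : Decidable (Spec_solve S K out) := by unfold Spec_solve; infer_instance

-- ===== CLAIM (what is proved, stated in full; the proofs are below) =====
def Claim_equal_solve : Prop := ∀ (S : String) (K : Int), Dom_solve S K → Spec_solve S K (solve S K)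

-- ===== LEMMAS AND PROOFS =====

-- run lengths (proof-only device): runsGo p c u scans u with an open run of char p, length c
def runsGo (prev : Char) (c : Int) (u : List Char) : List Int :=
  match u with
  | [] => [c]
  | y :: ys => if y = prev then runsGo prev (c + 1) ys else c :: runsGo y 1 ys

lemma runsGo_ne_nil (u : List Char) : ∀ p c, runsGo p c u ≠ [] := by
  induction u with
  | nil => intro p c; simp [runsGo]
  | cons y ys ih =>
    intro p c
    by_cases hy : y = p <;> simp [runsGo, hy, ih]

lemma getLastD_irrel {α : Type} (R : List α) (h : R ≠ []) (d e : α) :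
    R.getLastD d = R.getLastD e := by
  rw [List.getLastD_eq_getLast?, List.getLastD_eq_getLast?, List.getLast?_eq_some_getLast h]
  rfl

lemma getLast_eq_getLastD {α : Type} (R : List α) (h : R ≠ []) (d : α) :
    R.getLast h = R.getLastD d := by
  rw [List.getLastD_eq_getLast?, List.getLast?_eq_some_getLast h]
  rfl

lemma getLastD_append {α : Type} (a b : List α) (h : b ≠ []) (d : α) :
    (a ++ b).getLastD d = b.getLastD d := by
  rw [List.getLastD_eq_getLast?, List.getLastD_eq_getLast?,
      List.getLast?_append_of_ne_nil a h]

lemma getLastD_replicate {α : Type} (n : Nat) (a d : α) :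
    (List.replicate (n + 1) a).getLastD d = a := by
  induction n with
  | zero => rfl
  | succ m ih => rw [List.replicate_succ, List.getLastD_cons]; simpa using ih

-- chain of adjacent equalities
lemma chain_eq (s : List Char) :
    ∀ i : Nat, (∀ j, j < i → s.getD j ' ' = s.getD (j + 1) ' ') → s.getD 0 ' ' = s.getD i ' ' := by
  intro i
  induction i with
  | zero => intro _; rfl
  | succ n ih =>
    intro h
    exact (ih fun j hj => h j (Nat.lt_succ_of_lt hj)).trans (h n (Nat.lt_succ_self n))

-- characterisation of first_diff ≠ -1: the FIRST adjacent mismatch k, never at the wrap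
lemma firstDiffGo_spec (s : List Char) :
    ∀ i : Nat, (∀ j, j < i → s.getD j ' ' = s.getD ((j + 1) % s.length) ' ') →
      firstDiffGo s i = -1 ∨
        ∃ k : Nat, i ≤ k ∧ k + 1 < s.length ∧ firstDiffGo s i = ((k + 1 : Nat) : Int) ∧
          s.getD k ' ' ≠ s.getD (k + 1) ' ' ∧
          (∀ j, j < k → s.getD j ' ' = s.getD ((j + 1) % s.length) ' ') := by
  suffices H : ∀ n i, s.length - i ≤ n →
      (∀ j, j < i → s.getD j ' ' = s.getD ((j + 1) % s.length) ' ') →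
      firstDiffGo s i = -1 ∨
        ∃ k : Nat, i ≤ k ∧ k + 1 < s.length ∧ firstDiffGo s i = ((k + 1 : Nat) : Int) ∧
          s.getD k ' ' ≠ s.getD (k + 1) ' ' ∧
          (∀ j, j < k → s.getD j ' ' = s.getD ((j + 1) % s.length) ' ') by
    intro i inv; exact H (s.length - i) i le_rfl inv
  intro n
  induction n with
  | zero =>
    intro i hle inv
    have hi : ¬ i < s.length := by omega
    left; rw [firstDiffGo]; simp [hi]
  | succ n ih =>
    intro i hle inv
    rw [firstDiffGo]
    by_cases hi : i < s.length
    · simp only [hi, dite_true]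
      by_cases hd : s.getD i ' ' ≠ s.getD ((i + 1) % s.length) ' '
      · rw [if_pos hd]
        rcases Nat.lt_or_ge (i + 1) s.length with h1 | h1
        · right
          refine ⟨i, le_rfl, h1, by rw [Nat.mod_eq_of_lt h1], ?_, fun j hj => inv j hj⟩
          rwa [Nat.mod_eq_of_lt h1] at hd
        · exfalso
          have hi1 : i + 1 = s.length := by omega
          have h0 : (i + 1) % s.length = 0 := by rw [hi1]; exact Nat.mod_self _
          have hch : s.getD 0 ' ' = s.getD i ' ' := by
            apply chain_eq
            intro j hj
            have := inv j hj
            rwa [Nat.mod_eq_of_lt (by omega)] at this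
          rw [h0] at hd
          exact hd hch.symm
      · rw [if_neg hd]
        have hd' := not_not.mp hd
        have inv' : ∀ j, j < i + 1 → s.getD j ' ' = s.getD ((j + 1) % s.length) ' ' := by
          intro j hj
          rcases Nat.lt_succ_iff_lt_or_eq.mp hj with h | h
          · exact inv j h
          · subst h; exact hd'
        rcases ih (i + 1) (by omega) inv' with h | ⟨k, hk1, hk2, hk3, hk4, hk5⟩
        · exact Or.inl h
        · exact Or.inr ⟨k, by omega, hk2, hk3, hk4, hk5⟩
    · left; simp [hi]

lemma firstDiff_spec (s : List Char) (h : firstDiff s ≠ -1) :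
    ∃ k : Nat, k + 1 < s.length ∧ firstDiff s = ((k + 1 : Nat) : Int) ∧
      s.getD k ' ' ≠ s.getD (k + 1) ' ' ∧
      (∀ j, j < k → s.getD j ' ' = s.getD (j + 1) ' ') := by
  rcases firstDiffGo_spec s 0 (by omega) with h1 | ⟨k, _, hk, he, hne, hpre⟩
  · exact absurd h1 h
  · refine ⟨k, hk, he, hne, fun j hj => ?_⟩
    have := hpre j hj
    rwa [Nat.mod_eq_of_lt (by omega)] at this

-- first_diff = -1 means the whole string consists of one character
lemma firstDiffGo_neg1 (s : List Char) :
    ∀ i : Nat, firstDiffGo s i = -1 →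
      ∀ j, i ≤ j → j + 1 < s.length → s.getD j ' ' = s.getD (j + 1) ' ' := by
  suffices H : ∀ n i, s.length - i ≤ n → firstDiffGo s i = -1 →
      ∀ j, i ≤ j → j + 1 < s.length → s.getD j ' ' = s.getD (j + 1) ' ' by
    intro i; exact H (s.length - i) i le_rfl
  intro n
  induction n with
  | zero => intro i hle _ j hij hj; omega
  | succ n ih =>
    intro i hle hres j hij hj
    rw [firstDiffGo] at hres
    by_cases hi : i < s.length
    · simp only [hi, dite_true] at hres
      by_cases hd : s.getD i ' ' ≠ s.getD ((i + 1) % s.length) ' '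
      · rw [if_pos hd] at hres
        exact absurd hres (by omega)
      · rw [if_neg hd] at hres
        rcases Nat.eq_or_lt_of_le hij with h | h
        · subst h
          have := not_not.mp hd
          rwa [Nat.mod_eq_of_lt (by omega)] at this
        · exact ih (i + 1) (by omega) hres j h hj
    · omega

lemma firstDiff_neg1_all (s : List Char) (h : firstDiff s = -1) :
    ∀ x ∈ s, x = s.getD 0 ' ' := by
  intro x hx
  obtain ⟨j, hj, rfl⟩ := List.mem_iff_getElem.mp hx
  have hg : s.getD 0 ' ' = s.getD j ' ' := by
    apply chain_eq
    intro i hi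
    exact firstDiffGo_neg1 s 0 h i (Nat.zero_le _) (by omega)
  rw [hg, List.getD_eq_getElem _ _ hj]

-- a constant run extends the open run
lemma runsGo_replicate_prefix (n : Nat) (p : Char) (a : Int) (w : List Char) :
    runsGo p a (List.replicate n p ++ w) = runsGo p (a + (n : Int)) w := by
  induction n generalizing a with
  | zero => simp
  | succ m ih =>
    rw [List.replicate_succ, List.cons_append]
    rw [show runsGo p a (p :: (List.replicate m p ++ w))
          = runsGo p (a + 1) (List.replicate m p ++ w) by simp [runsGo]]
    rw [ih]
    congr 1
    push_cast
    ring

lemma runsGo_cons_ne (p y : Char) (c : Int) (ys : List Char) (h : y ≠ p) :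
    runsGo p c (y :: ys) = c :: runsGo y 1 ys := by
  simp [runsGo, h]

-- a run of a DIFFERENT char closes the open run
lemma runsGo_rep_append (q' c' : Char) (X : Int) (m : Nat) (u : List Char)
    (hne : c' ≠ q') (hm : 1 ≤ m) :
    runsGo q' X (List.replicate m c' ++ u) = X :: runsGo c' (m : Int) u := by
  cases m with
  | zero => omega
  | succ m' =>
    rw [List.replicate_succ, List.cons_append, runsGo_cons_ne _ _ _ _ hne,
        runsGo_replicate_prefix]
    congr 2
    push_cast
    ring

lemma runsGo_replicate_only (q' c' : Char) (X : Int) (m : Nat)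
    (hne : c' ≠ q') (hm : 1 ≤ m) :
    runsGo q' X (List.replicate m c') = [X, (m : Int)] := by
  have := runsGo_rep_append q' c' X m [] hne hm
  simpa [runsGo] using this

-- splitting a scan at an append boundary
lemma runsGo_append (u : List Char) :
    ∀ (p : Char) (c : Int) (v : List Char),
      runsGo p c (u ++ v)
        = (runsGo p c u).dropLast ++ runsGo (u.getLastD p) ((runsGo p c u).getLastD 0) v := by
  induction u with
  | nil => intro p c v; simp [runsGo]
  | cons y ys ih =>
    intro p c v
    by_cases hy : y = p
    · subst hy
      rw [show runsGo y c (y :: ys ++ v) = runsGo y (c + 1) (ys ++ v) by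
            rw [List.cons_append]; simp [runsGo]]
      rw [ih y (c + 1) v]
      have h1 : runsGo y c (y :: ys) = runsGo y (c + 1) ys := by simp [runsGo]
      rw [h1, List.getLastD_cons]
    · rw [List.cons_append, runsGo_cons_ne _ _ _ _ hy, runsGo_cons_ne _ _ _ _ hy,
          ih y 1 v, List.getLastD_cons]
      obtain ⟨r, rs, hrr⟩ := List.exists_cons_of_ne_nil (runsGo_ne_nil ys y 1)
      rw [hrr]
      simp only [List.dropLast_cons₂]
      rfl

-- B's helper loop, characterised by the run lengths
lemma fpass_fold (u : List Char) :
    ∀ (p : Char) (tot run : Int),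
      ((p :: u).zip u).foldl (fun (st : Int × Int) (pr : Char × Char) =>
          if pr.2 = pr.1 then (st.1, st.2 + 1)
          else (st.1 + PySem.Int.floordiv st.2 2, 1)) (tot, run)
        = (tot + ((runsGo p run u).dropLast.map (fun r => PySem.Int.floordiv r 2)).sum,
           (runsGo p run u).getLastD 0) := by
  induction u with
  | nil => intro p tot run; simp [runsGo]
  | cons y ys ih =>
    intro p tot run
    rw [List.zip_cons_cons, List.foldl_cons]
    by_cases hy : y = p
    · subst hy
      rw [if_pos rfl]
      have h1 : runsGo y run (y :: ys) = runsGo y (run + 1) ys := by simp [runsGo]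
      rw [h1]
      exact ih y tot (run + 1)
    · rw [if_neg hy, runsGo_cons_ne _ _ _ _ hy]
      obtain ⟨r, rs, hrr⟩ := List.exists_cons_of_ne_nil (runsGo_ne_nil ys y 1)
      rw [ih y (tot + PySem.Int.floordiv run 2) 1, hrr]
      simp only [List.dropLast_cons₂, List.map_cons, List.sum_cons, List.getLastD_cons]
      exact Prod.ext (by ring) rfl

lemma sum_map_last (R : List Int) (h : R ≠ []) (f : Int → Int) :
    (R.map f).sum = (R.dropLast.map f).sum + f (R.getLastD 0) := by
  conv_lhs => rw [← List.dropLast_concat_getLast h]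
  rw [List.map_append, List.sum_append, getLast_eq_getLastD R h 0]
  simp

lemma fpass_eq (p : Char) (u : List Char) :
    fpass (p :: u) = ((runsGo p 1 u).map (fun r => PySem.Int.floordiv r 2)).sum := by
  show (let st := ((p :: u).zip u).foldl _ (0, 1); st.1 + PySem.Int.floordiv st.2 2) = _
  rw [fpass_fold u p 0 1, sum_map_last _ (runsGo_ne_nil u p 1)]
  simp

-- the last maximal run of a nonempty list, as an explicit replicate suffix
lemma last_run (u : List Char) : u ≠ [] → ∃ (w : List Char) (n : Nat), 1 ≤ n ∧
    u = w ++ List.replicate n (u.getLastD ' ') ∧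
    (w ≠ [] → w.getLastD ' ' ≠ u.getLastD ' ') := by
  induction u with
  | nil => intro h; exact absurd rfl h
  | cons a rest ih =>
    intro _
    rcases eq_or_ne rest [] with rfl | hrest
    · exact ⟨[], 1, le_rfl, by simp, by simp⟩
    · obtain ⟨w2, n, hn, hdecomp, hlast⟩ := ih hrest
      have hq : (a :: rest).getLastD ' ' = rest.getLastD ' ' := by
        rw [List.getLastD_cons]; exact getLastD_irrel rest hrest a ' '
      cases w2 with
      | nil =>
        simp only [List.nil_append] at hdecomp
        by_cases ha : a = rest.getLastD ' '
        · refine ⟨[], n + 1, by omega, ?_, by simp⟩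
          rw [List.nil_append, hq, List.replicate_succ]
          exact congrArg₂ List.cons ha hdecomp
        · exact ⟨[a], n, hn, by rw [hq, List.singleton_append, ← hdecomp],
            fun _ => by
              rw [hq]
              simpa using ha⟩
      | cons b w2' =>
        refine ⟨a :: b :: w2', n, hn, ?_, fun _ => ?_⟩
        · rw [hq, List.cons_append, ← hdecomp]
        · rw [hq, List.getLastD_cons]
          have := hlast (by simp)
          rwa [getLastD_irrel (b :: w2') (by simp) a ' ']

-- first_diff of a string that starts with an n-fold constant run is n
lemma firstDiffGo_stop (s : List Char) (k : Nat) (hk : k < s.length)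
    (hmis : s.getD k ' ' ≠ s.getD ((k + 1) % s.length) ' ')
    (heq : ∀ j, j < k → s.getD j ' ' = s.getD (j + 1) ' ') :
    ∀ i, i ≤ k → firstDiffGo s i = (((k + 1) % s.length : Nat) : Int) := by
  suffices H : ∀ d i, k - i ≤ d → i ≤ k → firstDiffGo s i = (((k + 1) % s.length : Nat) : Int) by
    intro i hi; exact H (k - i) i le_rfl hi
  intro d
  induction d with
  | zero =>
    intro i h1 h2
    have : i = k := by omega
    subst this
    rw [firstDiffGo]
    simp only [hk, dite_true]
    rw [if_pos hmis]
  | succ d ih =>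
    intro i h1 h2
    rcases Nat.eq_or_lt_of_le h2 with rfl | hlt
    · rw [firstDiffGo]
      simp only [hk, dite_true]
      rw [if_pos hmis]
    · rw [firstDiffGo]
      simp only [show i < s.length by omega, dite_true]
      have heqi : s.getD i ' ' = s.getD ((i + 1) % s.length) ' ' := by
        rw [Nat.mod_eq_of_lt (by omega)]
        exact heq i hlt
      rw [if_neg (by simpa using heqi)]
      exact ih (i + 1) (by omega) (by omega)

lemma getD_rep_append_lt (n j : Nat) (a : Char) (z : List Char) (hj : j < n) :
    (List.replicate n a ++ z).getD j ' ' = a := by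
  rw [List.getD_eq_getElem _ _ (by simp; omega)]
  rw [List.getElem_append_left (by simpa using hj)]
  simp

lemma firstDiff_replicate (n : Nat) (a : Char) (z : List Char) (hn : 1 ≤ n) (hz : z ≠ [])
    (hhead : z.getD 0 ' ' ≠ a) : firstDiff (List.replicate n a ++ z) = (n : Int) := by
  have hzlen : 1 ≤ z.length := by
    cases z with | nil => exact absurd rfl hz | cons _ _ => simp
  have hlen : (List.replicate n a ++ z).length = n + z.length := by simp
  have hnlt : n < (List.replicate n a ++ z).length := by omega
  have hgn : (List.replicate n a ++ z).getD n ' ' = z.getD 0 ' ' := by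
    rw [List.getD_eq_getElem _ _ hnlt, List.getElem_append_right (by simp)]
    simp only [List.length_replicate, Nat.sub_self]
    rw [List.getD_eq_getElem _ _ (by omega)]
  have hstop := firstDiffGo_stop (List.replicate n a ++ z) (n - 1) (by omega)
    (by
      rw [Nat.mod_eq_of_lt (by omega), getD_rep_append_lt n (n - 1) a z (by omega)]
      rw [show n - 1 + 1 = n by omega, hgn]
      exact fun h => hhead h.symm)
    (by
      intro j hj
      rw [getD_rep_append_lt n j a z (by omega), getD_rep_append_lt n (j + 1) a z (by omega)])
    0 (by omega)
  rw [firstDiff, hstop]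
  congr 1
  rw [show n - 1 + 1 = n by omega, Nat.mod_eq_of_lt (by omega)]

-- a foldl over the index range reading through getD is the foldl over the list itself
lemma foldl_range_getD {β σ : Type} (ys : List β) (d : β) (h : σ → β → σ) (init : σ) :
    (List.range ys.length).foldl (fun st i => h st (ys.getD i d)) init = ys.foldl h init := by
  induction ys using List.reverseRecOn generalizing init with
  | nil => simp
  | append_singleton ys a ih =>
    rw [List.length_append, List.length_singleton, List.range_succ, List.foldl_append,
        List.foldl_append]
    have hcongr : (List.range ys.length).foldl
        (fun st i => h st ((ys ++ [a]).getD i d)) init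
        = (List.range ys.length).foldl (fun st i => h st (ys.getD i d)) init := by
      apply PySem.List.foldl_congr_mem
      intro acc i hi
      have hi' : i < ys.length := List.mem_range.mp hi
      congr 1
      simp [List.getD_eq_getElem?_getD, List.getElem?_append_left hi']
    rw [hcongr, ih]
    simp [List.getD_eq_getElem?_getD]

-- A's indexed loop over range(l) with wrap-around reads is the fold over adjacent pairs,
-- the last pair wrapping to the head
lemma foldl_range_pairs {σ : Type} (x : Char) (t : List Char) (fA fB : σ → σ) (init : σ) :
    (List.range (x :: t).length).foldl (fun st i =>
        if (x :: t).getD i ' ' ≠ (x :: t).getD ((i + 1) % (x :: t).length) ' '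
        then fA st else fB st) init
    = ((x :: t).zip (t ++ [x])).foldl (fun st pr => if pr.1 ≠ pr.2 then fA st else fB st) init := by
  have hzlen : ((x :: t).zip (t ++ [x])).length = (x :: t).length := by simp
  have step : (List.range (x :: t).length).foldl (fun st i =>
        if (x :: t).getD i ' ' ≠ (x :: t).getD ((i + 1) % (x :: t).length) ' '
        then fA st else fB st) init
      = (List.range ((x :: t).zip (t ++ [x])).length).foldl
          (fun st i => (fun st (pr : Char × Char) => if pr.1 ≠ pr.2 then fA st else fB st) st
            (((x :: t).zip (t ++ [x])).getD i (' ', ' '))) init := by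
    rw [hzlen]
    apply PySem.List.foldl_congr_mem
    intro acc i hi
    have hil : i < (x :: t).length := List.mem_range.mp hi
    have hil2 : i < ((x :: t).zip (t ++ [x])).length := by rw [hzlen]; exact hil
    have hib : i < (t ++ [x]).length := by
      simp only [List.length_append, List.length_cons] at hil ⊢
      omega
    rw [List.getD_eq_getElem _ _ hil2, List.getElem_zip]
    rcases Nat.lt_or_ge i t.length with hlt | hge
    · have h2 : (i + 1) % (x :: t).length = i + 1 := Nat.mod_eq_of_lt (by simp; omega)
      rw [h2, List.getD_eq_getElem _ _ hil, List.getD_eq_getElem _ _ (by simp; omega)]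
      simp only [List.getElem_append_left hlt, List.getElem_cons_succ]
      rfl
    · have hi' : i = t.length := by simp at hil; omega
      subst hi'
      have h2 : (t.length + 1) % (x :: t).length = 0 := by
        simp only [List.length_cons]; exact Nat.mod_self _
      rw [h2, List.getD_eq_getElem _ _ hil, List.getD_eq_getElem _ _ (by simp)]
      simp only [List.getElem_append_right (le_refl t.length)]
      simp
  rw [step]
  exact foldl_range_getD ((x :: t).zip (t ++ [x])) (' ', ' ')
    (fun st pr => if pr.1 ≠ pr.2 then fA st else fB st) init

-- appending one char different from the final char closes all runs and opens a run of length 1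
lemma runsGo_append_ne (u : List Char) :
    ∀ (p z : Char) (c : Int), z ≠ u.getLastD p →
      runsGo p c (u ++ [z]) = runsGo p c u ++ [1] := by
  induction u with
  | nil => intro p z c hz; simp at hz; simp [runsGo, hz]
  | cons y ys ih =>
    intro p z c hz
    rw [List.getLastD_cons] at hz
    by_cases hy : y = p
    · subst hy
      simpa [runsGo] using ih y z (c + 1) hz
    · simp only [List.cons_append, runsGo, if_neg hy]
      rw [ih y z 1 hz]

-- A's fused counter loop over adjacent pairs, characterised by the run lengths
lemma zipfold_spec (rest : List Char) :
    ∀ (q p : Char) (c cs cl : Int),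
      ((p :: rest).zip (rest ++ [q])).foldl (fun (st : Int × Int × Int) (pr : Char × Char) =>
          if pr.1 ≠ pr.2 then
            (1, st.2.1 + PySem.Int.floordiv st.1 2, PySem.Int.floordiv st.1 2)
          else (st.1 + 1, st.2.1, st.2.2)) (c, cs, cl) =
        (((runsGo p c (rest ++ [q])).getLast?).getD 0,
         cs + ((runsGo p c (rest ++ [q])).dropLast.map (fun r => PySem.Int.floordiv r 2)).sum,
         ((runsGo p c (rest ++ [q])).dropLast.getLast?).elim cl (fun r => PySem.Int.floordiv r 2)) := by
  induction rest with
  | nil =>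
    intro q p c cs cl
    by_cases hq : p = q
    · subst hq; simp [runsGo]
    · simp [runsGo, hq, Ne.symm hq]
  | cons y ys ih =>
    intro q p c cs cl
    rw [List.cons_append, List.zip_cons_cons, List.foldl_cons]
    by_cases hy : y = p
    · subst hy
      rw [if_neg (show ¬ ((y, y).1 ≠ (y, y).2) by simp)]
      simpa [runsGo] using ih q y (c + 1) cs cl
    · have hpy : p ≠ y := fun h => hy h.symm
      rw [if_pos (show ((p, y).1 ≠ (p, y).2) from hpy)]
      rw [show ((1 : Int), ((c : Int), cs, cl).2.1 + PySem.Int.floordiv ((c : Int), cs, cl).1 2, PySem.Int.floordiv ((c : Int), cs, cl).1 2) = ((1 : Int), cs + PySem.Int.floordiv c 2, PySem.Int.floordiv c 2) from rfl]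
      rw [ih q y 1 (cs + PySem.Int.floordiv c 2) (PySem.Int.floordiv c 2)]
      have hruns : runsGo p c (y :: (ys ++ [q])) = c :: runsGo y 1 (ys ++ [q]) := by
        simp [runsGo, hy]
      rw [hruns]
      obtain ⟨r, rs', hrr⟩ := List.exists_cons_of_ne_nil (runsGo_ne_nil (ys ++ [q]) y 1)
      rw [hrr]
      refine Prod.ext ?_ (Prod.ext ?_ ?_)
      · simp
      · simp only [List.dropLast_cons₂, List.map_cons, List.sum_cons]
        ring
      · cases rs' with
        | nil => simp
        | cons d ds =>
          simp only [List.dropLast_cons₂]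
          cases hgl : (r :: (d :: ds).dropLast).getLast? with
          | none => simp at hgl
          | some v => simp [hgl]

lemma elim_getLast (A : List Int) (a b cl : Int) :
    ((A ++ [a, b]).getLast?).elim cl (fun r => PySem.Int.floordiv r 2)
      = PySem.Int.floordiv b 2 := by
  rw [show A ++ [a, b] = (A ++ [a]) ++ [b] by simp, List.getLast?_concat]
  rfl

-- the non-constant case where the first and last characters of S differ: no correction fires
lemma case_plain (S : String) (K : Int) (k : Nat) (c x : Char) (v : List Char)
    (hs : S.toList = List.replicate (k + 1) c ++ (x :: v))
    (hxc : x ≠ c) (hvl : v.getLastD x ≠ c) :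
    solve S K = solve_alt S K := by
  have hc0 : S.toList.getD 0 ' ' = c := by
    rw [hs]; exact getD_rep_append_lt (k + 1) 0 c _ (by omega)
  have hfde : firstDiff S.toList = ((k + 1 : Nat) : Int) := by
    rw [hs]
    exact firstDiff_replicate (k + 1) c (x :: v) (by omega) (by simp) (by simpa using hxc)
  have hfd : ¬ firstDiff S.toList = -1 := by rw [hfde]; omega
  have hBall : ¬ (S.toList.all (fun ch => ch == S.toList.getD 0 ' ') = true) := by
    intro hall
    have hx := List.all_eq_true.mp hall x (by rw [hs]; simp)
    rw [beq_iff_eq, hc0] at hx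
    exact hxc hx
  have hdrop : S.toList.drop (k + 1) = x :: v := by
    rw [hs, List.drop_left' (by simp)]
  have htak : S.toList.take (k + 1) = List.replicate (k + 1) c := by
    rw [hs, List.take_left' (by simp)]
  have hlastc : PySem.List.pyGetD S.toList (-1) ' ' = v.getLastD x := by
    rw [PySem.List.pyGetD_neg_one S.toList ' ' (by rw [hs]; simp)]
    rw [getLast_eq_getLastD _ _ ' ', hs, getLastD_append _ _ (by simp) ' ', List.getLastD_cons]
  have hRv := runsGo_ne_nil v x 1
  simp only [solve, solve_alt]
  rw [if_neg hfd, if_neg hBall, hfde,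
      PySem.List.slice_from_natCast, PySem.List.slice_to_natCast,
      hdrop, htak, List.cons_append]
  have hslen : S.toList.length = (x :: (v ++ List.replicate (k + 1) c)).length := by
    rw [hs]; simp; omega
  simp only [hslen]
  rw [foldl_range_pairs x (v ++ List.replicate (k + 1) c), zipfold_spec,
      runsGo_append_ne _ x x 1
        (by rw [getLastD_append v _ (by simp) x, getLastD_replicate k c x]; exact hxc)]
  simp only [List.getLast?_concat, Option.getD_some, List.dropLast_concat]
  rw [if_neg (by norm_num : ¬ (1 : Int) > 2)]
  rw [hc0, hlastc, if_neg (fun h => hvl h.symm)]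
  have hR1 : runsGo x 1 (v ++ List.replicate (k + 1) c)
      = (runsGo x 1 v).dropLast ++ [(runsGo x 1 v).getLastD 0, ((k + 1 : Nat) : Int)] := by
    rw [runsGo_append v x 1,
        runsGo_replicate_only _ c _ (k + 1) (fun h => hvl h.symm) (by omega)]
  have hfp1 : fpass S.toList
      = PySem.Int.floordiv (1 + (k : Int)) 2
        + ((runsGo x 1 v).map (fun r => PySem.Int.floordiv r 2)).sum := by
    rw [show S.toList = c :: (List.replicate k c ++ (x :: v)) by
          rw [hs, List.replicate_succ, List.cons_append]]
    rw [fpass_eq, runsGo_replicate_prefix, runsGo_cons_ne _ _ _ _ hxc]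
    simp
  have hfp2 : fpass (S.toList ++ S.toList)
      = PySem.Int.floordiv (1 + (k : Int)) 2
        + (((runsGo x 1 v).dropLast.map (fun r => PySem.Int.floordiv r 2)).sum
            + (PySem.Int.floordiv ((runsGo x 1 v).getLastD 0) 2
            + (PySem.Int.floordiv ((k + 1 : Nat) : Int) 2
            + ((runsGo x 1 v).map (fun r => PySem.Int.floordiv r 2)).sum))) := by
    rw [show S.toList ++ S.toList
          = c :: (List.replicate k c ++ (x :: (v ++ (List.replicate (k + 1) c ++ (x :: v))))) by
        rw [hs, List.replicate_succ]
        simp [List.append_assoc]]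
    rw [fpass_eq, runsGo_replicate_prefix, runsGo_cons_ne _ _ _ _ hxc,
        runsGo_append v x 1,
        runsGo_rep_append _ c _ (k + 1) _ (fun h => hvl h.symm) (by omega),
        runsGo_cons_ne _ _ _ _ hxc]
    simp [List.map_append, List.sum_append]
  rw [hfp1, hfp2, hR1]
  rw [sum_map_last (runsGo x 1 v) hRv]
  simp only [List.map_append, List.sum_append, List.map_cons, List.sum_cons,
             List.map_nil, List.sum_nil]
  rw [show PySem.Int.floordiv (1 + (k : Int)) 2 = PySem.Int.floordiv ((k : Int) + 1) 2 by
        rw [Int.add_comm]]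
  push_cast
  ring

-- the non-constant case where the first and last characters of S agree: the wrap merges runs
lemma case_merge (S : String) (K : Int) (k m : Nat) (c x : Char) (w' : List Char)
    (hs : S.toList = List.replicate (k + 1) c ++ (x :: (w' ++ List.replicate (m + 1) c)))
    (hxc : x ≠ c) (hwl : w'.getLastD x ≠ c) :
    solve S K = solve_alt S K := by
  have hc0 : S.toList.getD 0 ' ' = c := by
    rw [hs]; exact getD_rep_append_lt (k + 1) 0 c _ (by omega)
  have hfde : firstDiff S.toList = ((k + 1 : Nat) : Int) := by
    rw [hs]
    exact firstDiff_replicate (k + 1) c _ (by omega) (by simp) (by simpa using hxc)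
  have hfd : ¬ firstDiff S.toList = -1 := by rw [hfde]; omega
  have hBall : ¬ (S.toList.all (fun ch => ch == S.toList.getD 0 ' ') = true) := by
    intro hall
    have hx := List.all_eq_true.mp hall x (by rw [hs]; simp)
    rw [beq_iff_eq, hc0] at hx
    exact hxc hx
  have hdrop : S.toList.drop (k + 1) = x :: (w' ++ List.replicate (m + 1) c) := by
    rw [hs, List.drop_left' (by simp)]
  have htak : S.toList.take (k + 1) = List.replicate (k + 1) c := by
    rw [hs, List.take_left' (by simp)]
  have hlastc : PySem.List.pyGetD S.toList (-1) ' ' = c := by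
    rw [PySem.List.pyGetD_neg_one S.toList ' ' (by rw [hs]; simp), getLast_eq_getLastD _ _ ' ', hs,
        getLastD_append _ _ (by simp) ' ', List.getLastD_cons,
        getLastD_append _ _ (by simp) x, getLastD_replicate m c x]
  have hsrev : S.toList.reverse
      = List.replicate (m + 1) c ++ (w'.reverse ++ (x :: List.replicate (k + 1) c)) := by
    rw [hs]
    simp [List.append_assoc]
  have hzhead : (w'.reverse ++ (x :: List.replicate (k + 1) c)).getD 0 ' ' ≠ c := by
    rcases eq_or_ne w' [] with rfl | hw
    · simpa using hxc
    · have h0 : (w'.reverse ++ (x :: List.replicate (k + 1) c)).getD 0 ' '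
          = w'.getLastD ' ' := by
        rw [List.getD_eq_getElem?_getD,
            List.getElem?_append_left
              (by simpa [List.length_reverse] using List.length_pos_of_ne_nil hw),
            ← List.head?_eq_getElem?, List.head?_reverse, List.getLastD_eq_getLast?]
      rw [h0, getLastD_irrel w' hw ' ' x]
      exact hwl
  have hrev : firstDiff S.toList.reverse = ((m + 1 : Nat) : Int) := by
    rw [hsrev]
    exact firstDiff_replicate (m + 1) c _ (by omega) (by simp) hzhead
  have hRw := runsGo_ne_nil w' x 1
  simp only [solve, solve_alt]
  rw [if_neg hfd, if_neg hBall, hfde,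
      PySem.List.slice_from_natCast, PySem.List.slice_to_natCast,
      hdrop, htak, List.cons_append]
  have hslen : S.toList.length
      = (x :: ((w' ++ List.replicate (m + 1) c) ++ List.replicate (k + 1) c)).length := by
    rw [hs]; simp; omega
  simp only [hslen]
  rw [foldl_range_pairs x ((w' ++ List.replicate (m + 1) c) ++ List.replicate (k + 1) c),
      zipfold_spec,
      runsGo_append_ne _ x x 1
        (by rw [getLastD_append _ _ (by simp) x, getLastD_replicate k c x]; exact hxc)]
  simp only [List.getLast?_concat, Option.getD_some, List.dropLast_concat]
  rw [if_neg (by norm_num : ¬ (1 : Int) > 2)]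
  rw [hc0, hlastc, if_pos rfl, hrev]
  have hR1 : runsGo x 1 ((w' ++ List.replicate (m + 1) c) ++ List.replicate (k + 1) c)
      = (runsGo x 1 w').dropLast
        ++ [(runsGo x 1 w').getLastD 0, (((m + 1) + (k + 1) : Nat) : Int)] := by
    rw [List.append_assoc, ← List.replicate_add, runsGo_append w' x 1,
        runsGo_replicate_only _ c _ _ (fun h => hwl h.symm) (by omega)]
  have hRu : runsGo x 1 (w' ++ List.replicate (m + 1) c)
      = (runsGo x 1 w').dropLast ++ [(runsGo x 1 w').getLastD 0, ((m + 1 : Nat) : Int)] := by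
    rw [runsGo_append w' x 1,
        runsGo_replicate_only _ c _ _ (fun h => hwl h.symm) (by omega)]
  have hfp1 : fpass S.toList
      = PySem.Int.floordiv (1 + (k : Int)) 2
        + (((runsGo x 1 w').dropLast.map (fun r => PySem.Int.floordiv r 2)).sum
            + (PySem.Int.floordiv ((runsGo x 1 w').getLastD 0) 2
            + PySem.Int.floordiv ((m + 1 : Nat) : Int) 2)) := by
    rw [show S.toList = c :: (List.replicate k c ++ (x :: (w' ++ List.replicate (m + 1) c))) by
          rw [hs, List.replicate_succ, List.cons_append]]
    rw [fpass_eq, runsGo_replicate_prefix, runsGo_cons_ne _ _ _ _ hxc, hRu]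
    simp [List.map_append, List.sum_append]
  have hfp2 : fpass (S.toList ++ S.toList)
      = PySem.Int.floordiv (1 + (k : Int)) 2
        + (((runsGo x 1 w').dropLast.map (fun r => PySem.Int.floordiv r 2)).sum
            + (PySem.Int.floordiv ((runsGo x 1 w').getLastD 0) 2
            + (PySem.Int.floordiv (((m + 1) + (k + 1) : Nat) : Int) 2
            + (((runsGo x 1 w').dropLast.map (fun r => PySem.Int.floordiv r 2)).sum
              + (PySem.Int.floordiv ((runsGo x 1 w').getLastD 0) 2
              + PySem.Int.floordiv ((m + 1 : Nat) : Int) 2))))) := by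
    rw [show S.toList ++ S.toList
          = c :: (List.replicate k c ++ (x :: (w' ++ (List.replicate ((m + 1) + (k + 1)) c
              ++ (x :: (w' ++ List.replicate (m + 1) c)))))) by
        rw [hs]
        conv_rhs => rw [List.replicate_add]
        simp [List.replicate_succ, List.append_assoc]]
    rw [fpass_eq, runsGo_replicate_prefix, runsGo_cons_ne _ _ _ _ hxc,
        runsGo_append w' x 1,
        runsGo_rep_append _ c _ ((m + 1) + (k + 1)) _ (fun h => hwl h.symm) (by omega),
        runsGo_cons_ne _ _ _ _ hxc, hRu]
    simp [List.map_append, List.sum_append]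
  rw [hfp1, hfp2, hR1, elim_getLast]
  simp only [List.map_append, List.sum_append, List.map_cons, List.sum_cons,
             List.map_nil, List.sum_nil]
  rw [show PySem.Int.floordiv (1 + (k : Int)) 2 = PySem.Int.floordiv ((k : Int) + 1) 2 by
        rw [Int.add_comm]]
  push_cast
  ring

-- ===== VERDICT (by name: the statement is the Claim_ definition above) =====
theorem solve_spec : Claim_equal_solve := by
  intro S K _hdom
  unfold Spec_solve
  by_cases hfd : firstDiff S.toList = -1
  · have hall : S.toList.all (fun ch => ch == S.toList.getD 0 ' ') = true := by
      simp only [List.all_eq_true, beq_iff_eq]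
      exact firstDiff_neg1_all S.toList hfd
    simp only [solve, solve_alt]
    rw [if_pos hfd, if_pos hall]
  · obtain ⟨k, hk, hfde, hne, hpre⟩ := firstDiff_spec S.toList hfd
    have hck : ∀ j, j ≤ k → S.toList.getD j ' ' = S.toList.getD 0 ' ' := by
      intro j hj
      exact (chain_eq S.toList j (fun i hi => hpre i (by omega))).symm
    have htake : S.toList.take (k + 1) = List.replicate (k + 1) (S.toList.getD 0 ' ') := by
      apply List.ext_getElem (by simp only [List.length_take, List.length_replicate]; omega)
      intro i h1 h2
      rw [List.getElem_take, List.getElem_replicate]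
      have hik : i ≤ k := by
        simp only [List.length_take] at h1; omega
      rw [← List.getD_eq_getElem S.toList ' ' (by omega)]
      exact hck i hik
    have hdrop : S.toList.drop (k + 1)
        = S.toList.getD (k + 1) ' ' :: S.toList.drop (k + 2) := by
      rw [List.getD_eq_getElem S.toList ' ' hk]
      exact List.drop_eq_getElem_cons hk
    have hs0 : S.toList = List.replicate (k + 1) (S.toList.getD 0 ' ')
        ++ (S.toList.getD (k + 1) ' ' :: S.toList.drop (k + 2)) := by
      conv_lhs => rw [← List.take_append_drop (k + 1) S.toList]
      rw [htake, hdrop]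
    have hxc : S.toList.getD (k + 1) ' ' ≠ S.toList.getD 0 ' ' := by
      intro h
      exact hne ((hck k le_rfl).trans h.symm)
    by_cases hq : (S.toList.drop (k + 2)).getLastD (S.toList.getD (k + 1) ' ')
        = S.toList.getD 0 ' '
    · -- the wrap case: peel off the last maximal run of the tail
      obtain ⟨w, n, hn, hudecomp, hwlast⟩ :=
        last_run (S.toList.getD (k + 1) ' ' :: S.toList.drop (k + 2)) (by simp)
      rw [List.getLastD_cons, hq] at hudecomp hwlast
      have hw_ne : w ≠ [] := by
        intro h
        rw [h, List.nil_append] at hudecomp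
        cases n with
        | zero => omega
        | succ m =>
          rw [List.replicate_succ] at hudecomp
          injection hudecomp with h1 _
          exact hxc h1
      obtain ⟨b, w', rfl⟩ := List.exists_cons_of_ne_nil hw_ne
      rw [List.cons_append] at hudecomp
      injection hudecomp with hbx hveq
      obtain ⟨m, rfl⟩ : ∃ m, n = m + 1 := ⟨n - 1, by omega⟩
      refine case_merge S K k m (S.toList.getD 0 ' ') (S.toList.getD (k + 1) ' ') w' ?_ hxc ?_
      · conv_lhs => rw [hs0]
        rw [hveq]
      · rw [← hbx] at hwlast
        have := hwlast (by simp)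
        rwa [List.getLastD_cons] at this
    · exact case_plain S K k (S.toList.getD 0 ' ') (S.toList.getD (k + 1) ' ')
        (S.toList.drop (k + 2)) hs0 hxc hq
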